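-- pv_equiv track=rewrite | github.com/thorthur22/Tali | src/tali/guardrails.py | _contains_memory_signal
-- ===== SOURCE A (Python) =====
-- def _contains_memory_signal(output: str) -> bool:
--     lowered = output.lower()
--     return any(
--         phrase in lowered
--         for phrase in (
--             "as we discussed",
--             "you told me",
--             "as noted before",
--             "earlier you said",
--             "previously you said",
--             "remember",
--         )
--     )
-- ===== SOURCE B (Python) =====
-- _PHRASES = (
--     "as we discussed",
--     "you told me",
--     "as noted before",
--     "earlier you said",
--     "previously you said",
--     "remember",
-- )
--
--
-- def _match_at(s, i, p):
--     # case-insensitive literal match of phrase p at position i of s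
--     if i + len(p) > len(s):
--         return False
--     return all(s[i + k].lower() == p[k] for k in range(len(p)))
--
--
-- def _contains_memory_signal(output: str) -> bool:
--     # single left-to-right scan: at each position try every phrase in place,
--     # never materialising a lowered copy of the whole string
--     for i in range(len(output)):
--         for p in _PHRASES:
--             if _match_at(output, i, p):
--                 return True
--     return False
-- ===== Notes on version B (the rewrite author's own statement) =====
-- stated objective: alternative
-- what changed: B replaces lower-the-whole-string-then-run-one-substring-search-per-phrase with a single left-to-right positional scan that tries each phrase in place with per-character case-insensitive comparison, never building the lowered copy.
import Mathlib
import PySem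

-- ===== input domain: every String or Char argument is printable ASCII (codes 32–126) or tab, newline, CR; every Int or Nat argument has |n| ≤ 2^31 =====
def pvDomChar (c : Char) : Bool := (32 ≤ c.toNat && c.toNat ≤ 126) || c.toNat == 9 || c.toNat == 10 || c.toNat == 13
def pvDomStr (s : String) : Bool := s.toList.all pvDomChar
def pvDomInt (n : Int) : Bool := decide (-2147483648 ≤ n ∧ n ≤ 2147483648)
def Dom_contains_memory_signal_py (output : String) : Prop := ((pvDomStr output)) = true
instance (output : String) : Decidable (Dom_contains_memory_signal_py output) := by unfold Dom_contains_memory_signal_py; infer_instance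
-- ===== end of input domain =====

-- B replaces lower-whole-string + per-phrase substring search with one positional scan
-- matching each phrase in place case-insensitively (objective: alternative; return value only).


-- ===== PORT A =====
def pvPhrasesA : List String :=
  ["as we discussed", "you told me", "as noted before",
   "earlier you said", "previously you said", "remember"]

def contains_memory_signal_py (output : String) : Bool :=
  let lowered := PySem.Str.lower output
  pvPhrasesA.any (fun phrase => PySem.Str.isIn phrase lowered)

-- ===== PORT B =====
def pvPhrasesB : List (List Char) :=
  ["as we discussed".toList, "you told me".toList, "as noted before".toList,
   "earlier you said".toList, "previously you said".toList, "remember".toList]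

-- _match_at: case-insensitive literal match of p at the head of s (false if s runs out)
def pvMatchAt : List Char → List Char → Bool
  | _, [] => true
  | [], _ :: _ => false
  | c :: s, q :: p => (PySem.Chars.lowerChar c == q) && pvMatchAt s p

def contains_memory_signal_py_alt (output : String) : Bool :=
  let s := output.toList
  (List.range s.length).any (fun i => pvPhrasesB.any (fun p => pvMatchAt (s.drop i) p))

-- ===== PRECONDITION & SPEC =====
def Spec_contains_memory_signal_py (output : String) (out : Bool) : Prop := out = contains_memory_signal_py_alt output
instance (output : String) (out : Bool) : Decidable (Spec_contains_memory_signal_py output out) := by unfold Spec_contains_memory_signal_py; infer_instance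

-- ===== CLAIM (what is proved, stated in full; the proofs are below) =====
def Claim_equal_contains_memory_signal_py : Prop := ∀ (output : String), Dom_contains_memory_signal_py output → Spec_contains_memory_signal_py output (contains_memory_signal_py output)

-- ===== LEMMAS AND PROOFS =====

theorem pvMatchAt_iff (p s : List Char) :
    pvMatchAt s p = true ↔ p <+: s.map PySem.Chars.lowerChar := by
  induction p generalizing s with
  | nil => simp [pvMatchAt]
  | cons q p ih =>
    cases s with
    | nil => simp [pvMatchAt]
    | cons c s =>
      simp only [pvMatchAt, Bool.and_eq_true, beq_iff_eq, ih, List.map_cons, List.cons_prefix_cons]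
      constructor <;> rintro ⟨h1, h2⟩ <;> exact ⟨h1.symm, h2⟩

theorem pvKey (s p : List Char) (hp : p ≠ []) :
    PySem.Chars.isIn p (PySem.Chars.lower s) = true ↔
      ∃ i < s.length, pvMatchAt (s.drop i) p = true := by
  rw [← PySem.Chars.exists_prefix_drop_iff_isIn]
  have hlow : PySem.Chars.lower s = s.map PySem.Chars.lowerChar := by
    simp [PySem.Chars.lower]
  have hdrop : ∀ j, (PySem.Chars.lower s).drop j = (s.drop j).map PySem.Chars.lowerChar := by
    intro j; simp [hlow, List.map_drop]
  constructor
  · rintro ⟨j, hj⟩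
    have hjlt : j < s.length := by
      by_contra h
      have : (PySem.Chars.lower s).drop j = [] := by
        apply List.drop_eq_nil_of_le
        simp [hlow]; omega
      rw [this] at hj
      exact hp (List.prefix_nil.mp hj)
    refine ⟨j, hjlt, ?_⟩
    rw [pvMatchAt_iff, ← hdrop]
    exact hj
  · rintro ⟨i, _, hm⟩
    rw [pvMatchAt_iff, ← hdrop] at hm
    exact ⟨i, hm⟩

-- ===== VERDICT (by name: the statement is the Claim_ definition above) =====
theorem contains_memory_signal_py_spec : Claim_equal_contains_memory_signal_py := by
  intro output _
  unfold Spec_contains_memory_signal_py contains_memory_signal_py contains_memory_signal_py_alt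
  rw [Bool.eq_iff_iff]
  simp only [List.any_eq_true, List.mem_range]
  constructor
  · rintro ⟨ph, hph, hin⟩
    have hne : ph.toList ≠ [] := by
      fin_cases hph <;> decide
    rw [PySem.Str.isIn_eq, PySem.Str.toList_lower] at hin
    obtain ⟨i, hi, hm⟩ := (pvKey output.toList ph.toList hne).mp hin
    refine ⟨i, hi, ph.toList, ?_, hm⟩
    fin_cases hph <;> simp [pvPhrasesB]
  · rintro ⟨i, hi, p, hp, hm⟩
    have : ∃ ph ∈ pvPhrasesA, ph.toList = p := by
      fin_cases hp <;> exact ⟨_, by simp [pvPhrasesA], rfl⟩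
    obtain ⟨ph, hph, rfl⟩ := this
    have hne : ph.toList ≠ [] := by
      fin_cases hph <;> decide
    refine ⟨ph, hph, ?_⟩
    rw [PySem.Str.isIn_eq, PySem.Str.toList_lower]
    exact (pvKey output.toList ph.toList hne).mpr ⟨i, hi, hm⟩
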